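-- pv_equiv track=rewrite | github.com/kimpro82/MyCodingContest | Programmers/PCCE/01/08.py | solution
-- ===== SOURCE A (Python) =====
-- def solution(num_list):
--     count_even = 0
--     answer = []
--
--     for num in num_list:
--         if num % 2 == 0:
--             answer.append("even")
--             count_even += 1
--
--             # if count_even > 3:
--             if count_even >= 3:
--                 break
--         else:
--             answer.append("odd")
--
--     return answer
-- ===== SOURCE B (Python) =====
-- def solution(num_list):
--     # Phase 1: locate the cutoff index (inclusive) of the 3rd even number.
--     cut = len(num_list)
--     count = 0
--     for i, num in enumerate(num_list):
--         if num % 2 == 0: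
--             count += 1
--             if count == 3:
--                 cut = i + 1
--                 break
--     # Phase 2: label the prefix.
--     return ["even" if num % 2 == 0 else "odd" for num in num_list[:cut]]
-- ===== Notes on version B (the rewrite author's own statement) =====
-- stated objective: alternative
-- what changed: Replaced the interleaved append-and-break loop by a two-phase locate-then-map: one pass finds the cutoff index of the 3rd even number, then a comprehension labels the prefix.
import Mathlib
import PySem

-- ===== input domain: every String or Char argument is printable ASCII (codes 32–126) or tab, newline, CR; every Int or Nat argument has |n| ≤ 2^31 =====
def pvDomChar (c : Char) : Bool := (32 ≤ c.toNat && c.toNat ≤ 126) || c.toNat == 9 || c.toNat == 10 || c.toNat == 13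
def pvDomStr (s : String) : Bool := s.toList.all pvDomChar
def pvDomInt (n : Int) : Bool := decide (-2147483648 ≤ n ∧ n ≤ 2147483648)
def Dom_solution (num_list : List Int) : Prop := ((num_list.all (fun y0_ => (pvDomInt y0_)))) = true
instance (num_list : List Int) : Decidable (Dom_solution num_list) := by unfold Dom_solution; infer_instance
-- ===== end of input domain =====

-- B changes the decomposition (locate cutoff, then map prefix); same values, same cost.

-- ===== PORT A =====
-- the loop with accumulator count_even; appends "even"/"odd" and breaks after the 3rd even
def solutionLoop (l : List Int) (count_even : Int) : List String :=
  match l with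
  | [] => []
  | num :: rest =>
    if PySem.Int.mod num 2 = 0 then
      "even" :: (if count_even + 1 ≥ 3 then [] else solutionLoop rest (count_even + 1))
    else
      "odd" :: solutionLoop rest count_even

def solution (num_list : List Int) : List String := solutionLoop num_list 0

-- ===== PORT B =====
-- phase 1: index i where the running even-count reaches 3 (none if it never does)
def findCut (l : List Int) (count : Int) : Option Nat :=
  match l with
  | [] => none
  | num :: rest =>
    if PySem.Int.mod num 2 = 0 then
      if count + 1 = 3 then some 0 else (findCut rest (count + 1)).map (· + 1)
    else
      (findCut rest count).map (· + 1)

-- phase 2: label the prefix num_list[:cut]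
def solution_alt (num_list : List Int) : List String :=
  let cut : Nat := match findCut num_list 0 with
    | some i => i + 1
    | none => num_list.length
  (num_list.take cut).map (fun num => if PySem.Int.mod num 2 = 0 then "even" else "odd")

-- ===== PRECONDITION & SPEC =====
def Spec_solution (num_list : List Int) (out : List String) : Prop := out = solution_alt num_list
instance (num_list : List Int) (out : List String) : Decidable (Spec_solution num_list out) := by unfold Spec_solution; infer_instance

-- ===== CLAIM (what is proved, stated in full; the proofs are below) =====
def Claim_equal_solution : Prop := ∀ (num_list : List Int), Dom_solution num_list → Spec_solution num_list (solution num_list)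

-- ===== LEMMAS AND PROOFS =====
theorem solutionLoop_eq (l : List Int) : ∀ (c : Int), c ≤ 2 →
    solutionLoop l c =
      (l.take (match findCut l c with | some i => i + 1 | none => l.length)).map
        (fun num => if PySem.Int.mod num 2 = 0 then "even" else "odd") := by
  induction l with
  | nil => intro c _; simp [solutionLoop, findCut]
  | cons num rest ih =>
    intro c hc
    simp only [solutionLoop, findCut]
    by_cases he : PySem.Int.mod num 2 = 0
    · by_cases h3 : c + 1 = 3
      · rw [if_pos he, if_pos (show c + 1 ≥ 3 by omega), if_pos he, if_pos h3]
        simp only [List.take_succ_cons, List.take_zero, List.map_cons, List.map_nil,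
          if_pos he]
      · rw [if_pos he, if_neg (show ¬ c + 1 ≥ 3 by omega), if_pos he, if_neg h3,
          ih (c + 1) (by omega)]
        cases findCut rest (c + 1) <;>
          simp only [Option.map_none, Option.map_some, List.length_cons,
            List.take_succ_cons, List.map_cons, if_pos he]
    · rw [if_neg he, if_neg he, ih c hc]
      cases findCut rest c <;>
        simp only [Option.map_none, Option.map_some, List.length_cons,
          List.take_succ_cons, List.map_cons, if_neg he]

-- ===== VERDICT (by name: the statement is the Claim_ definition above) =====
theorem solution_spec : Claim_equal_solution := by
  intro l _
  unfold Spec_solution solution solution_alt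
  exact solutionLoop_eq l 0 (by omega)
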